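-- pv_equiv track=rewrite | github.com/MaximeRenoux/character_network_fondation | retrieve_chars_from_misc.py | have_common_word
-- ===== SOURCE A (Python) =====
-- COMMON_WORD_MINIMUM_LENGTH = 3
--
-- def have_common_word(str1, str2):
--     words1 = set(str1.split())
--     words2 = set(str2.split())
--
--     common_words = words1.intersection(words2)
--
--     long_enough = False
--     for word in common_words:
--         if len(word) >= COMMON_WORD_MINIMUM_LENGTH:
--             long_enough = True
--     if long_enough:
--         return len(common_words) > 0
--     else:
--         return False
-- ===== SOURCE B (Python) =====
-- COMMON_WORD_MINIMUM_LENGTH = 3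
--
-- def have_common_word(str1, str2):
--     long1 = {w for w in str1.split() if len(w) >= COMMON_WORD_MINIMUM_LENGTH}
--     return any(w in long1 for w in str2.split())
-- ===== Notes on version B (the rewrite author's own statement) =====
-- stated objective: simpler
-- what changed: Instead of materialising the full word-set intersection and then sweeping it with a flag loop plus a redundant nonemptiness test, B filters str1's words to those of length >= 3 once and short-circuits on the first word of str2 found in that set.
import Mathlib
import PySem

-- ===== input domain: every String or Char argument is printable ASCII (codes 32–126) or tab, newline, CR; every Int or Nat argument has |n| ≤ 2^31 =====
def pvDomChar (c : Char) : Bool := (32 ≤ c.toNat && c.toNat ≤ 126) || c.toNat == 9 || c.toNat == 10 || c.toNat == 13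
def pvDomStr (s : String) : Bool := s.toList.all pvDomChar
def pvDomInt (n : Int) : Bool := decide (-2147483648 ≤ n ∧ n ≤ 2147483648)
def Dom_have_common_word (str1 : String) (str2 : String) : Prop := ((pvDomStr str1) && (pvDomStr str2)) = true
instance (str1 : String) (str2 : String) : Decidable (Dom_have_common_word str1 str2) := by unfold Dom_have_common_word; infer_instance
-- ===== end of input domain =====

-- B is simpler: it filters str1's words to the long ones up front and short-circuits over
-- str2's words, instead of building the full word-set intersection and sweeping it with a
-- flag loop plus a redundant nonemptiness test.

-- ===== PORT A =====
def have_common_word (str1 : String) (str2 : String) : Bool :=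
  let words1 : PySem.Set String := PySem.Set.ofList (PySem.Str.split₀ str1)
  let words2 : PySem.Set String := PySem.Set.ofList (PySem.Str.split₀ str2)
  let common_words : PySem.Set String := PySem.Set.inter words1 words2
  -- the for-loop over the set only computes 'some common word is long', order-independent
  let long_enough : Bool :=
    common_words.foldl (fun b word => if PySem.Str.len word ≥ 3 then true else b) false
  if long_enough then decide (PySem.Set.len common_words > 0) else false

-- ===== PORT B =====
def have_common_word_alt (str1 : String) (str2 : String) : Bool :=
  let long1 : PySem.Set String :=
    PySem.Set.ofList ((PySem.Str.split₀ str1).filter (fun w => PySem.Str.len w ≥ 3))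
  (PySem.Str.split₀ str2).any (fun w => PySem.Set.contains long1 w)

-- ===== PRECONDITION & SPEC =====
def Spec_have_common_word (str1 : String) (str2 : String) (out : Bool) : Prop := out = have_common_word_alt str1 str2
instance (str1 : String) (str2 : String) (out : Bool) : Decidable (Spec_have_common_word str1 str2 out) := by unfold Spec_have_common_word; infer_instance

-- ===== CLAIM (what is proved, stated in full; the proofs are below) =====
def Claim_equal_have_common_word : Prop := ∀ (str1 : String) (str2 : String), Dom_have_common_word str1 str2 → Spec_have_common_word str1 str2 (have_common_word str1 str2)

-- ===== LEMMAS AND PROOFS =====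

-- A's flag loop is 'any long word in the list'
theorem foldl_flag (xs : List String) (b : Bool) :
    xs.foldl (fun b word => if PySem.Str.len word ≥ 3 then true else b) b
      = (b || xs.any (fun w => decide (PySem.Str.len w ≥ 3))) := by
  induction xs generalizing b with
  | nil => simp
  | cons x xs ih =>
    simp only [List.foldl, List.any_cons, ih]
    split <;> rename_i h <;> cases b <;> simp
    · exact Or.inl (by simpa [PySem.Str.len] using h)
    · intro hx; exact absurd (by simpa [PySem.Str.len] using hx) h

-- A returns true iff some word of str2 also occurs in str1 and has length ≥ 3
theorem both_iff (str1 str2 : String) :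
    have_common_word str1 str2 = true ↔
      ∃ w ∈ PySem.Str.split₀ str2, w ∈ PySem.Str.split₀ str1 ∧ PySem.Str.len w ≥ 3 := by
  unfold have_common_word
  dsimp only
  rw [foldl_flag, Bool.false_or]
  set common := PySem.Set.inter (PySem.Set.ofList (PySem.Str.split₀ str1)) (PySem.Set.ofList (PySem.Str.split₀ str2)) with hc
  by_cases hany : common.any (fun w => decide (PySem.Str.len w ≥ 3)) = true
  · rw [if_pos hany]
    simp only [List.any_eq_true, decide_eq_true_eq] at hany
    obtain ⟨w, hw, hp⟩ := hany
    have hmem := (PySem.Set.mem_inter _ _ _).mp (hc ▸ hw)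
    simp only [PySem.Set.mem_ofList] at hmem
    constructor
    · exact fun _ => ⟨w, hmem.2, hmem.1, hp⟩
    · intro _
      simp only [PySem.Set.len, gt_iff_lt, decide_eq_true_eq]
      exact_mod_cast List.length_pos_of_mem hw
  · rw [if_neg hany]
    simp only [List.any_eq_true, decide_eq_true_eq, not_exists] at hany
    simp only [Bool.false_eq_true, false_iff, not_exists]
    intro w hn
    obtain ⟨hn, h1, hlen⟩ := hn
    have hw : w ∈ common := by
      rw [hc, PySem.Set.mem_inter]
      simp only [PySem.Set.mem_ofList]; exact ⟨h1, hn⟩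
    have hlt : ¬ PySem.Str.len w ≥ 3 := fun hg => hany w ⟨hw, hg⟩
    exact hlt hlen

-- B returns true under exactly the same condition
theorem alt_iff (str1 str2 : String) :
    have_common_word_alt str1 str2 = true ↔
      ∃ w ∈ PySem.Str.split₀ str2, w ∈ PySem.Str.split₀ str1 ∧ PySem.Str.len w ≥ 3 := by
  unfold have_common_word_alt
  dsimp only
  simp only [List.any_eq_true]
  constructor
  · rintro ⟨w, hw, hcnt⟩
    have hm := (PySem.Set.contains_iff _ _).mp hcnt
    rw [PySem.Set.mem_ofList, List.mem_filter] at hm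
    exact ⟨w, hw, hm.1, by simpa using hm.2⟩
  · rintro ⟨w, h2, h1, hlen⟩
    refine ⟨w, h2, (PySem.Set.contains_iff _ _).mpr ?_⟩
    rw [PySem.Set.mem_ofList, List.mem_filter]
    exact ⟨h1, by simpa using hlen⟩

-- ===== VERDICT (by name: the statement is the Claim_ definition above) =====
theorem have_common_word_spec : Claim_equal_have_common_word := by
  intro str1 str2 _
  unfold Spec_have_common_word
  rw [Bool.eq_iff_iff, both_iff, alt_iff]
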